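-- pv_equiv track=rewrite | github.com/hyerongii/Algorithm | Lecture/day08_0807_Stack1_2/21650_developfunc/21650_PF.py | solution
-- ===== SOURCE A (Python) =====
-- def count_num(array, n):
--     answer =0
--     for i in array :
--         if i ==n :
--             answer+=1
--     return answer
--
-- def solution(progresses, speeds):
--     stack = []
--     answer = []
--
--     # 받은 리스트 요소의 개수
--     N = len(progresses)
--
--     result = []
--     # 리스트 내 돌면서 date계산하기
--     for i in range(N):
--         # 이때, 나머지가 0 이 아니면 몫보다 +1 해줘서 날짜수 확실히 해줌
--         if (100-progresses[i])%speeds[i] != 0: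
--             date = ((100-progresses[i])//speeds[i])+1
--         else:
--             date = ((100-progresses[i])//speeds[i])
--         """
--         from math import ceil
--         date = ceil((100 - progresses[i]) / speeds[i])
--         25 ~ 28 line 은 위의 ceil 함수를 사용해서 구현할 수 있습니당
--
--         그리고 progresses[i]는 자주 사용하기 때문에 변수로 지정해서 변수로 활용해주면 좋습니다.
--         progress = progress[i] 로 놓고, progress를 사용
--         """
--         # 그리고 그 date를 stack에 쌓는데,
--         # 큰 date 뒤에 작은 date가 들어오면 큰 date 값으로 변환해 쌓아줌
--         if not stack or stack[-1] < date:
--             stack.append(date)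
--         elif stack[-1] >= date:
--             stack.append(stack[-1])
--         """
--         위에 40 ~ 43 line을 아래와 같이 바꾸면, 밑에서 각 작업 번호가 몇 개 나오는 지 세지 않아도 됩니다.
--         결국 같은 원리로 동작하는건데, 작업속도가 더 빠르면 누적 작업개수를 저장하는 리스트를 만들어서 누적시켜주는 원리입니다.
--         텍스트로 설명하기 애매한데 아래 코드 보고 이해 안되면 말씀주세요! 여튼 아래처럼 하면 count하는 부분을 안해도 됩니다.
--         물론 원래 작성하셨던 코드도 충분히 훌륭해서, 굳이 개선하자면 아래와같아지는 것 뿐이니까 그냥 참고로만 받아드리시면 됩니다~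
--         어려운 문젠데 잘 푸셨네요~ 고생하셨어요
--
--         if not stack or stack[-1] < date:
--             stack.append(date)
--             result.append(1)
--         elif stack[-1] >= date:
--             result[-1] += 1
--         """
--     # 그렇게 쌓여진 스택 라스트를 검토
--     # 만약 date -> [5, 10, 1, 1, 20, 1]
--     # stack -> [5, 10, 10, 10, 20, 20]
--     # 그리고 answer에 세어준 값 넣어주기
--     for i in stack:
--         c = count_num(stack, i)
--         answer.append(c)
--         for _ in range(c-1):
--             stack.remove(i)
--     # answer -> [1, 3, 2]
--
--     return answer
-- ===== SOURCE B (Python) =====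
-- def solution(progresses, speeds):
--     # One pass: run-length count the non-decreasing running-max of completion dates.
--     answer = []
--     cur = None
--     cnt = 0
--     for p, s in zip(progresses, speeds):
--         d = -((p - 100) // s)  # ceil((100 - p) / s)
--         if cur is None or d > cur:
--             if cnt:
--                 answer.append(cnt)
--             cur, cnt = d, 1
--         else:
--             cnt += 1
--     if cnt:
--         answer.append(cnt)
--     return answer
-- ===== Notes on version B (the rewrite author's own statement) =====
-- stated objective: faster
-- what changed: Replaces A's O(n^2) second phase (counting each stack value with a scan and deleting duplicates with repeated list.remove) by a single pass that run-length counts the running maximum of the ceil-division dates as it is computed, never materialising the stack.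
import Mathlib
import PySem

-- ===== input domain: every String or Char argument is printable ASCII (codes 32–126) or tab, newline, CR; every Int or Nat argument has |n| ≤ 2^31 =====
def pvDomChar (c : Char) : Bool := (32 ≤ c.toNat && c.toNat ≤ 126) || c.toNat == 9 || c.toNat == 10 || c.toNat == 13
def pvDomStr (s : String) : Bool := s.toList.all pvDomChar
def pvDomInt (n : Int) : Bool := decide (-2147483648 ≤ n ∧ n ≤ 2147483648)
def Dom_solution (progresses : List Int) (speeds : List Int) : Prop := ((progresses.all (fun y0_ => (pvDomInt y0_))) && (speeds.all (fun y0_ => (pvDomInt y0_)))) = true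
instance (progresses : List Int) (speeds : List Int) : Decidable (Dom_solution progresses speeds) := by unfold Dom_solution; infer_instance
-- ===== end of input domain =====

-- B replaces A's quadratic count-and-remove phase by a one-pass run-length count of the
-- running maximum of the dates (objective: faster).

-- ===== PORT A =====
def count_num (array : List Int) (n : Int) : Int :=
  array.foldl (fun answer i => if i == n then answer + 1 else answer) 0

-- 'for _ in range(c-1): stack.remove(i)'; the .getD fallback is never reached on the
-- inputs solution feeds it (i is always still present), where Python would raise ValueError.
def pvRemoveLoop (stack : List Int) (i : Int) : Nat → List Int
  | 0 => stack
  | Nat.succ k => pvRemoveLoop ((PySem.List.remove? stack i).getD stack) i k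

theorem pvRemoveLoop_length_le (stack : List Int) (i : Int) (k : Nat) :
    (pvRemoveLoop stack i k).length ≤ stack.length := by
  induction k generalizing stack with
  | zero => simp [pvRemoveLoop]
  | succ k ih =>
    refine le_trans (ih _) ?_
    rcases h : PySem.List.remove? stack i with _ | s
    · simp
    · have hm : i ∈ stack := by
        by_contra hc
        rw [(PySem.List.remove?_eq_none_iff stack i).mpr hc] at h; cases h
      rw [PySem.List.remove?_eq_some_erase stack i hm] at h
      cases h
      exact List.length_erase_le

-- 'for i in stack: ...' with in-place removal: faithful index-based loop over the mutating list.
def pvCountLoop (stack : List Int) (idx : Nat) (answer : List Int) : List Int :=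
  if h : idx < stack.length then
    pvCountLoop (pvRemoveLoop stack stack[idx] (count_num stack stack[idx] - 1).toNat)
      (idx + 1) (answer ++ [count_num stack stack[idx]])
  else answer
termination_by stack.length - idx
decreasing_by
  have := pvRemoveLoop_length_le stack stack[idx] (count_num stack stack[idx] - 1).toNat
  omega

def solution (progresses : List Int) (speeds : List Int) : List Int :=
  -- pyGetD stands for progresses[i] / speeds[i]; out-of-range (IndexError) is excluded by
  -- Pre_, and so is a zero divisor in floordiv/mod (ZeroDivisionError).
  let N : Int := (progresses.length : Int)
  let stack := (PySem.List.pyRange 0 N 1).foldl (fun stack i =>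
      let p := PySem.List.pyGetD progresses i 0
      let s := PySem.List.pyGetD speeds i 0
      let date :=
        if PySem.Int.mod (100 - p) s ≠ 0 then PySem.Int.floordiv (100 - p) s + 1
        else PySem.Int.floordiv (100 - p) s
      if stack = [] ∨ PySem.List.pyGetD stack (-1) 0 < date then stack ++ [date]
      else if date ≤ PySem.List.pyGetD stack (-1) 0 then stack ++ [PySem.List.pyGetD stack (-1) 0]
      else stack) []
  pvCountLoop stack 0 []

-- ===== PORT B =====
def solution_alt (progresses : List Int) (speeds : List Int) : List Int :=
  let st := (progresses.zip speeds).foldl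
    (fun (st : Option Int × Int × List Int) pr =>
      let d := -(PySem.Int.floordiv (pr.1 - 100) pr.2)
      if st.1.all (fun c => decide (c < d)) then
        (some d, 1, if st.2.1 ≠ 0 then st.2.2 ++ [st.2.1] else st.2.2)
      else (st.1, st.2.1 + 1, st.2.2))
    (none, 0, [])
  if st.2.1 ≠ 0 then st.2.2 ++ [st.2.1] else st.2.2

-- ===== PRECONDITION & SPEC =====
-- Pre_ excludes exactly the inputs where A raises: speeds shorter than progresses
-- (IndexError) and a zero speed at a used index (ZeroDivisionError).
def Pre_solution (progresses : List Int) (speeds : List Int) : Prop :=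
  progresses.length ≤ speeds.length ∧ ∀ pr ∈ progresses.zip speeds, pr.2 ≠ 0
instance (progresses : List Int) (speeds : List Int) : Decidable (Pre_solution progresses speeds) := by
  unfold Pre_solution; infer_instance

def pvWitness_solution : List Int × List Int := ([93, 30, 55], [1, 30, 5])

def Spec_solution (progresses : List Int) (speeds : List Int) (out : List Int) : Prop :=
  out = solution_alt progresses speeds
instance (progresses : List Int) (speeds : List Int) (out : List Int) : Decidable (Spec_solution progresses speeds out) := by
  unfold Spec_solution; infer_instance

-- ===== CLAIM (what is proved, stated in full; the proofs are below) =====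
def Claim_equal_solution : Prop := ∀ (progresses : List Int) (speeds : List Int),
  Dom_solution progresses speeds → Pre_solution progresses speeds →
  Spec_solution progresses speeds (solution progresses speeds)

-- ===== LEMMAS AND PROOFS =====

-- the per-task ceil date, as A computes it
def pvDateOf (pr : Int × Int) : Int :=
  if PySem.Int.mod (100 - pr.1) pr.2 ≠ 0 then PySem.Int.floordiv (100 - pr.1) pr.2 + 1
  else PySem.Int.floordiv (100 - pr.1) pr.2

-- one step of A's stack-building loop
def pvBStep (stack : List Int) (date : Int) : List Int :=
  if stack = [] ∨ PySem.List.pyGetD stack (-1) 0 < date then stack ++ [date]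
  else if date ≤ PySem.List.pyGetD stack (-1) 0 then stack ++ [PySem.List.pyGetD stack (-1) 0]
  else stack

-- one step of B's run-length loop (d already computed)
def pvRStep (st : Option Int × Int × List Int) (d : Int) : Option Int × Int × List Int :=
  if st.1.all (fun c => decide (c < d)) then
    (some d, 1, if st.2.1 ≠ 0 then st.2.2 ++ [st.2.1] else st.2.2)
  else (st.1, st.2.1 + 1, st.2.2)

-- the stack as a list of (value, run length) groups
def pvFlat (g : List (Int × Nat)) : List Int := (g.map (fun p => List.replicate p.2 p.1)).flatten

def pvGood (g : List (Int × Nat)) : Prop :=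
  g.Pairwise (fun a b => a.1 < b.1) ∧ ∀ p ∈ g, 1 ≤ p.2

theorem pvFlat_append (g h : List (Int × Nat)) : pvFlat (g ++ h) = pvFlat g ++ pvFlat h := by
  simp [pvFlat]

theorem pvGood_snoc (G : List (Int × Nat)) (v : Int) (c : Nat) :
    pvGood (G ++ [(v, c)]) ↔ pvGood G ∧ (∀ p ∈ G, p.1 < v) ∧ 1 ≤ c := by
  constructor
  · rintro ⟨hp, hc⟩
    rw [List.pairwise_append] at hp
    exact ⟨⟨hp.1, fun p hp' => hc p (by simp [hp'])⟩,
      fun p hp' => hp.2.2 p hp' (v, c) (by simp), hc (v, c) (by simp)⟩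
  · rintro ⟨⟨hp, hc⟩, hlt, h1⟩
    refine ⟨List.pairwise_append.mpr ⟨hp, by simp, ?_⟩, ?_⟩
    · intro a ha b hb; simp at hb; subst hb; exact hlt a ha
    · intro p hp'
      rcases List.mem_append.mp hp' with h | h
      · exact hc p h
      · simp at h; subst h; exact h1

theorem pv_mem_pvFlat {x : Int} {G : List (Int × Nat)} (h : x ∈ pvFlat G) :
    ∃ p ∈ G, x = p.1 := by
  simp only [pvFlat, List.mem_flatten, List.mem_map] at h
  obtain ⟨l, ⟨p, hp, rfl⟩, hx⟩ := h
  exact ⟨p, hp, (List.eq_of_mem_replicate hx)⟩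

-- ceiling division: -((-a) // b) for 0 < b, as A computes it with // and %
theorem pv_ceil_core (a b : Int) (hb : 0 < b) :
    -(PySem.Int.floordiv (-a) b) =
      if PySem.Int.mod a b ≠ 0 then PySem.Int.floordiv a b + 1 else PySem.Int.floordiv a b := by
  have hmod : PySem.Int.mod a b = a % b := PySem.Int.mod_eq_emod_of_pos hb
  have hdm := PySem.Int.floordiv_mul_add_mod a b
  have hr0 : 0 ≤ PySem.Int.mod a b := by rw [hmod]; exact Int.emod_nonneg a (by omega)
  have hrlt : PySem.Int.mod a b < b := by rw [hmod]; exact Int.emod_lt_of_pos a hb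
  set q0 := PySem.Int.floordiv a b with hq0
  set r := PySem.Int.mod a b with hr
  by_cases h : r = 0
  · rw [if_neg (by simpa using h)]
    rw [PySem.Int.neg_floordiv_neg_eq_iff_of_pos hb]
    constructor
    · nlinarith
    · nlinarith
  · rw [if_pos h]
    rw [PySem.Int.neg_floordiv_neg_eq_iff_of_pos hb]
    constructor
    · nlinarith [lt_of_le_of_ne hr0 (Ne.symm h)]
    · nlinarith

theorem pv_ceil_eq (p s : Int) (hs : s ≠ 0) :
    -(PySem.Int.floordiv (p - 100) s) = pvDateOf (p, s) := by
  rcases lt_or_gt_of_ne hs with hneg | hpos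
  · have e1 : PySem.Int.floordiv (100 - p) s = PySem.Int.floordiv (p - 100) (-s) := by
      simpa [neg_sub] using PySem.Int.floordiv_neg_neg (p - 100) (-s)
    have e2 : PySem.Int.mod (100 - p) s = -PySem.Int.mod (p - 100) (-s) := by
      simpa [neg_sub] using PySem.Int.mod_neg_neg (p - 100) (-s)
    rw [pvDateOf]
    simp only [e1, e2, neg_ne_zero]
    rw [← PySem.Int.floordiv_neg_neg (p - 100) s]
    exact pv_ceil_core (p - 100) (-s) (by omega)
  · have hcore := pv_ceil_core (100 - p) s hpos
    rw [pvDateOf]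
    simpa [show -(100 - p) = p - 100 by ring] using hcore

theorem pv_count_num_eq (xs : List Int) (n : Int) : count_num xs n = (xs.count n : Int) := by
  simpa [count_num] using PySem.List.foldl_beq_add_one (l := xs) (v := n) (a := 0)

theorem pv_remove_append (pre rest : List Int) (v : Int) (h : v ∉ pre) :
    PySem.List.remove? (pre ++ v :: rest) v = some (pre ++ rest) := by
  induction pre with
  | nil => simp
  | cons x xs ih =>
    have hx : x ≠ v := by simp at h; exact fun e => h.1 e.symm
    have := ih (by simp at h; exact h.2)
    simp [PySem.List.remove?_cons_of_ne _ hx, this]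

theorem pv_removeLoop_eq (v : Int) :
    ∀ (k : Nat) (pre t : List Int) (c : Nat), v ∉ pre → k < c →
      pvRemoveLoop (pre ++ List.replicate c v ++ t) v k = pre ++ List.replicate (c - k) v ++ t := by
  intro k
  induction k with
  | zero => intro pre t c h hc; simp [pvRemoveLoop]
  | succ k ih =>
    intro pre t c h hc
    obtain ⟨c', rfl⟩ : ∃ c', c = c' + 1 := ⟨c - 1, by omega⟩
    have hrm : PySem.List.remove? (pre ++ List.replicate (c' + 1) v ++ t) v
        = some (pre ++ (List.replicate c' v ++ t)) := by
      have := pv_remove_append pre (List.replicate c' v ++ t) v h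
      rw [List.replicate_succ, List.append_assoc]
      simpa using this
    show pvRemoveLoop ((PySem.List.remove? (pre ++ List.replicate (c' + 1) v ++ t) v).getD _) v k = _
    rw [hrm]
    simp only [Option.getD_some]
    rw [show c' + 1 - (k + 1) = c' - k from by omega, ← List.append_assoc]
    exact ih pre t c' h (by omega)

theorem pv_countLoop_eq (g : List (Int × Nat)) : ∀ (reps ans : List Int),
    pvGood g → (∀ x ∈ reps, ∀ p ∈ g, x < p.1) →
    pvCountLoop (reps ++ pvFlat g) reps.length ans = ans ++ g.map (fun p => (p.2 : Int)) := by
  induction g with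
  | nil =>
    intro reps ans _ _
    rw [pvCountLoop]
    simp [pvFlat]
  | cons pc g ih =>
    rintro reps ans ⟨hpw, hcnt⟩ hlt
    obtain ⟨v, c⟩ := pc
    have hc1 : 1 ≤ c := hcnt (v, c) (by simp)
    have hvg : ∀ p ∈ g, v < p.1 := by
      intro p hp; exact (List.pairwise_cons.mp hpw).1 p hp
    have hvreps : v ∉ reps := fun hm => lt_irrefl v (hlt v hm (v, c) (by simp))
    have hflat : pvFlat ((v, c) :: g) = List.replicate c v ++ pvFlat g := by
      simp [pvFlat]
    have hstack : reps ++ pvFlat ((v, c) :: g)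
        = reps ++ List.replicate c v ++ pvFlat g := by
      rw [hflat, List.append_assoc]
    have hlen : reps.length < (reps ++ pvFlat ((v, c) :: g)).length := by
      rw [hstack]; simp; omega
    have hget : (reps ++ pvFlat ((v, c) :: g))[reps.length]'hlen = v := by
      have hrep : List.replicate c v = v :: List.replicate (c - 1) v := by
        cases c with
        | zero => omega
        | succ c' => simp [List.replicate_succ]
      rw [List.getElem_eq_iff hlen, hstack, List.append_assoc, hrep]
      rw [List.getElem?_append_right (le_refl reps.length)]
      simp
    have hcount : count_num (reps ++ pvFlat ((v, c) :: g)) v = (c : Int) := by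
      rw [pv_count_num_eq, hstack]
      have h1 : reps.count v = 0 := List.count_eq_zero.mpr hvreps
      have h2 : (pvFlat g).count v = 0 := by
        refine List.count_eq_zero.mpr fun hm => ?_
        obtain ⟨p, hp, rfl⟩ := pv_mem_pvFlat hm
        exact lt_irrefl p.1 (hvg p hp)
      simp [List.count_append, h1, h2]
    rw [pvCountLoop, dif_pos hlen, hget, hcount]
    have htn : ((c : Int) - 1).toNat = c - 1 := by omega
    rw [htn, hstack, pv_removeLoop_eq v (c - 1) reps (pvFlat g) c hvreps (by omega)]
    have hc1' : c - (c - 1) = 1 := by omega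
    rw [hc1']
    have : reps ++ List.replicate 1 v ++ pvFlat g = (reps ++ [v]) ++ pvFlat g := by simp
    rw [this]
    have hlen' : (reps ++ [v]).length = reps.length + 1 := by simp
    rw [← hlen']
    rw [ih (reps ++ [v]) (ans ++ [(c : Int)]) ⟨(List.pairwise_cons.mp hpw).2, fun p hp => hcnt p (by simp [hp])⟩ ?side]
    · simp
    case side =>
      intro x hx p hp
      rcases List.mem_append.mp hx with h | h
      · exact hlt x h p (by simp [hp])
      · simp at h; subst h; exact hvg p hp

-- fold over range(len(progresses)) with indexing = fold over the zip
theorem pv_index_zip (ps ss : List Int) (h : ps.length ≤ ss.length)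
    {β : Type} (f : β → Int × Int → β) (init : β) :
    (PySem.List.pyRange 0 (ps.length : Int) 1).foldl
      (fun st i => f st (PySem.List.pyGetD ps i 0, PySem.List.pyGetD ss i 0)) init
    = (ps.zip ss).foldl f init := by
  have hmap : (PySem.List.pyRange 0 (ps.length : Int) 1).map
      (fun i => (PySem.List.pyGetD ps i 0, PySem.List.pyGetD ss i 0)) = ps.zip ss := by
    rw [PySem.List.pyRange_zero_nat, List.map_map]
    refine List.ext_getElem (by simp; omega) ?_
    intro k h1 h2
    have hk : k < ps.length := by simpa using h1
    have hk2 : k < ss.length := lt_of_lt_of_le hk h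
    simp only [List.getElem_map, List.getElem_range, Function.comp_apply]
    rw [PySem.List.pyGetD_natCast, PySem.List.pyGetD_natCast]
    simp [List.getD_eq_getElem?_getD, hk, hk2, List.getElem_zip]
  rw [← hmap, List.foldl_map]

-- the combined invariant of A's stack fold and B's run-length fold
theorem pv_main_fold (ds : List Int) :
    (ds = [] ∧ ds.foldl pvBStep [] = [] ∧ ds.foldl pvRStep (none, 0, []) = (none, 0, []))
    ∨ ∃ (g : List (Int × Nat)) (v : Int) (c : Nat), pvGood (g ++ [(v, c)])
        ∧ ds.foldl pvBStep [] = pvFlat (g ++ [(v, c)])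
        ∧ ds.foldl pvRStep (none, 0, []) = (some v, (c : Int), g.map (fun p => (p.2 : Int))) := by
  induction ds using List.reverseRecOn with
  | nil => left; exact ⟨rfl, rfl, rfl⟩
  | append_singleton ds d ih =>
    right
    rw [List.foldl_append, List.foldl_append]
    rcases ih with ⟨_, hb, hr⟩ | ⟨g, v, c, hgood, hb, hr⟩
    · rw [hb, hr]
      refine ⟨[], d, 1, ?_, ?_, ?_⟩
      · exact (pvGood_snoc [] d 1).mpr ⟨⟨List.Pairwise.nil, by simp⟩, by simp, le_refl 1⟩
      · simp [pvBStep, pvFlat]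
      · simp [pvRStep]
    · rw [hb, hr]
      have hc1 : 1 ≤ c := ((pvGood_snoc g v c).mp hgood).2.2
      have hrep0 : List.replicate c v = List.replicate (c - 1) v ++ [v] := by
        conv_lhs => rw [show c = (c - 1) + 1 from by omega]
        rw [List.replicate_succ']
      have hlast : pvFlat (g ++ [(v, c)]) = (pvFlat g ++ List.replicate (c - 1) v) ++ [v] := by
        rw [pvFlat_append]
        simp [pvFlat, hrep0]
      by_cases hvd : v < d
      · refine ⟨g ++ [(v, c)], d, 1, ?_, ?_, ?_⟩
        · refine (pvGood_snoc (g ++ [(v, c)]) d 1).mpr ⟨hgood, ?_, le_refl 1⟩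
          intro p hp
          rcases List.mem_append.mp hp with h | h
          · exact lt_trans (((pvGood_snoc g v c).mp hgood).2.1 p h) hvd
          · simp at h; subst h; exact hvd
        · unfold pvBStep
          rw [hlast]
          simp only [List.foldl_cons, List.foldl_nil]
          rw [if_pos (Or.inr (by rw [PySem.List.pyGetD_neg_one_append_singleton]; exact hvd))]
          rw [pvFlat_append, pvFlat_append]
          simp [pvFlat]
          rw [hrep0]
          simp
        · unfold pvRStep
          simp only [List.foldl_cons, List.foldl_nil]
          simp only [Option.all_some]
          rw [if_pos (by simpa using hvd)]
          simp
          omega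
      · refine ⟨g, v, c + 1, ?_, ?_, ?_⟩
        · obtain ⟨h1, h2, _⟩ := (pvGood_snoc g v c).mp hgood
          exact (pvGood_snoc g v (c + 1)).mpr ⟨h1, h2, by omega⟩
        · unfold pvBStep
          rw [hlast]
          simp only [List.foldl_cons, List.foldl_nil]
          rw [if_neg (by push Not; exact ⟨by simp, by rw [PySem.List.pyGetD_neg_one_append_singleton]; omega⟩)]
          rw [if_pos (by rw [PySem.List.pyGetD_neg_one_append_singleton]; omega)]
          rw [PySem.List.pyGetD_neg_one_append_singleton]
          rw [pvFlat_append]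
          have hrep1 : List.replicate (c + 1) v = (List.replicate (c - 1) v ++ [v]) ++ [v] := by
            rw [List.replicate_succ', hrep0]
          simp [pvFlat, hrep1]
        · unfold pvRStep
          simp only [List.foldl_cons, List.foldl_nil]
          simp only [Option.all_some]
          rw [if_neg (by simpa using hvd)]
          have : ((c : Int) + 1) = ((c + 1 : Nat) : Int) := by push_cast; ring
          rw [this]
-- ===== VERDICT (by name: the statement is the Claim_ definition above) =====
theorem pv_solution_eq (ps ss : List Int) (hpre : Pre_solution ps ss) :
    solution ps ss = pvCountLoop (((ps.zip ss).map pvDateOf).foldl pvBStep []) 0 [] := by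
  show pvCountLoop ((PySem.List.pyRange 0 (ps.length : Int) 1).foldl
      (fun st i => pvBStep st (pvDateOf (PySem.List.pyGetD ps i 0, PySem.List.pyGetD ss i 0))) []) 0 []
    = pvCountLoop (((ps.zip ss).map pvDateOf).foldl pvBStep []) 0 []
  rw [pv_index_zip ps ss hpre.1 (fun st pr => pvBStep st (pvDateOf pr)) []]
  rw [← List.foldl_map]

theorem pv_solution_alt_eq (ps ss : List Int) (hpre : Pre_solution ps ss) :
    solution_alt ps ss =
      (fun st : Option Int × Int × List Int =>
        if st.2.1 ≠ 0 then st.2.2 ++ [st.2.1] else st.2.2)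
      (((ps.zip ss).map pvDateOf).foldl pvRStep (none, 0, [])) := by
  show (fun st : Option Int × Int × List Int => if st.2.1 ≠ 0 then st.2.2 ++ [st.2.1] else st.2.2)
      ((ps.zip ss).foldl (fun st pr => pvRStep st (-(PySem.Int.floordiv (pr.1 - 100) pr.2))) (none, 0, []))
    = (fun st : Option Int × Int × List Int => if st.2.1 ≠ 0 then st.2.2 ++ [st.2.1] else st.2.2)
      (((ps.zip ss).map pvDateOf).foldl pvRStep (none, 0, []))
  rw [List.foldl_map]
  congr 1
  refine PySem.List.foldl_congr_mem _ _ _ _ ?_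
  intro acc pr hpr
  obtain ⟨p, s⟩ := pr
  have hs : s ≠ 0 := hpre.2 (p, s) hpr
  show pvRStep acc (-(PySem.Int.floordiv (p - 100) s)) = pvRStep acc (pvDateOf (p, s))
  rw [pv_ceil_eq p s hs]

theorem solution_spec : Claim_equal_solution := by
  intro ps ss _ hpre
  show solution ps ss = solution_alt ps ss
  rw [pv_solution_eq ps ss hpre, pv_solution_alt_eq ps ss hpre]
  rcases pv_main_fold ((ps.zip ss).map pvDateOf) with ⟨_, hb, hr⟩ | ⟨g, v, c, hgood, hb, hr⟩
  · rw [hb, hr]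
    rw [pvCountLoop]
    simp
  · rw [hb, hr]
    have hc1 : 1 ≤ c := ((pvGood_snoc g v c).mp hgood).2.2
    have := pv_countLoop_eq (g ++ [(v, c)]) [] [] hgood (by simp)
    simp only [List.nil_append, List.length_nil] at this
    rw [this]
    simp
    omega
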